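-- pv_equiv track=rewrite | github.com/slawus/advent-of-code | 2025/06/solution.py | part1
-- ===== SOURCE A (Python) =====
-- def part1(data) -> int:
--
--     total = 0
--     for x in range(len(data[0])):
--         column = [row[x] for row in data]
--         sign = column[-1].strip()
--         if sign == '*':
--             result = 1
--             for i in column[:-1]:
--                 result *= int(i)
--         else:
--             result = 0
--             for i in column[:-1]:
--                 result += int(i)
--
--         total += result
--
--
--     return total
-- ===== SOURCE B (Python) =====
-- def part1(data) -> int:
--     # Row-major single sweep: maintain per-column running sums and products,
--     # then combine with the sign row at the end.
--     w = len(data[0])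
--     sums = [0] * w
--     prods = [1] * w
--     for row in data[:-1]:
--         vals = [int(row[x]) for x in range(w)]
--         sums = [s + v for s, v in zip(sums, vals)]
--         prods = [p * v for p, v in zip(prods, vals)]
--     last = data[-1]
--     return sum(p if last[x].strip() == '*' else sums[x] for x, p in enumerate(prods))
-- ===== Notes on version B (the rewrite author's own statement) =====
-- stated objective: alternative
-- what changed: Replaces the column-major pass (slicing each column out of the grid and folding it separately) by one row-major sweep that maintains per-column running sum and product arrays, combined with the sign row at the end.
import Mathlib
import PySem

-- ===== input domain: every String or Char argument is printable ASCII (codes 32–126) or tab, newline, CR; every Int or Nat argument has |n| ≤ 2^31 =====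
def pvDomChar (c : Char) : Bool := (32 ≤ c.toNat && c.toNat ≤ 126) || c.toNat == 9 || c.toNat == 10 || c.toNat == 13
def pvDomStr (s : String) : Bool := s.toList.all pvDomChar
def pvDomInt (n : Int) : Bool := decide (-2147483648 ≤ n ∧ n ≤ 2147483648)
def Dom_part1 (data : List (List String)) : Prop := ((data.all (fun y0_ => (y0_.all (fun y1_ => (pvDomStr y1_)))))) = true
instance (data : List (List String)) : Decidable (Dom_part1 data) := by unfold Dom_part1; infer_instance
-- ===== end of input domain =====

-- B replaces A's column-major pass (slice each column, fold it) by one row-major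
-- sweep maintaining per-column running sums and products; alternative decomposition, same cost.

-- ===== PORT A =====
def part1 (data : List (List String)) : Int :=
  (PySem.List.pyRange 0 ((PySem.List.pyGetD data 0 []).length : Int) 1).foldl
    (fun total x =>
      let column := data.map (fun row => PySem.List.pyGetD row x "")
      let sign := PySem.Str.strip (PySem.List.pyGetD column (-1) "")
      let result :=
        if sign = "*" then
          (PySem.List.slice column none (some (-1))).foldl
            (fun r i => r * (PySem.Int.ofStr? i).getD 0) 1
        else
          (PySem.List.slice column none (some (-1))).foldl
            (fun r i => r + (PySem.Int.ofStr? i).getD 0) 0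
      total + result) 0

-- ===== PORT B =====
def part1_alt (data : List (List String)) : Int :=
  let w := (PySem.List.pyGetD data 0 []).length
  let sp := (PySem.List.slice data none (some (-1))).foldl
    (fun (sp : List Int × List Int) row =>
      let vals := (List.range w).map
        (fun (x : Nat) => (PySem.Int.ofStr? (PySem.List.pyGetD row (x : Int) "")).getD 0)
      ((sp.1.zip vals).map (fun p => p.1 + p.2),
       (sp.2.zip vals).map (fun p => p.1 * p.2)))
    (List.replicate w 0, List.replicate w 1)
  let last := PySem.List.pyGetD data (-1) []
  ((PySem.List.enumerate sp.2).map (fun xp =>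
      if PySem.Str.strip (PySem.List.pyGetD last xp.1 "") = "*" then xp.2
      else PySem.List.pyGetD sp.1 xp.1 0)).sum

-- ===== PRECONDITION & SPEC =====
-- Pre_ = exactly the inputs where the Python A returns: nonempty grid (data[0] and
-- column[-1] would raise IndexError), every row at least as long as the first
-- (row[x] IndexError), and every summed/multiplied cell parses as int (ValueError).
def Pre_part1 (data : List (List String)) : Prop :=
  data ≠ [] ∧
  (∀ row ∈ data, data.headI.length ≤ row.length) ∧
  (∀ row ∈ data.dropLast, ∀ x ∈ List.range data.headI.length,
      (PySem.Int.ofStr? (row.getD x "")).isSome)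
instance (data : List (List String)) : Decidable (Pre_part1 data) := by
  unfold Pre_part1; infer_instance

def pvWitness_part1 : List (List String) := [["2", "3"], ["4", "5"], ["*", " "]]

def Spec_part1 (data : List (List String)) (out : Int) : Prop := out = part1_alt data
instance (data : List (List String)) (out : Int) : Decidable (Spec_part1 data out) := by
  unfold Spec_part1; infer_instance

-- ===== CLAIM (what is proved, stated in full; the proofs are below) =====
def Claim_equal_part1 : Prop :=
  ∀ (data : List (List String)), Dom_part1 data → Pre_part1 data → Spec_part1 data (part1 data)

-- ===== LEMMAS AND PROOFS =====

-- int(row[x]) with default 0 (Pre_ guarantees the default is never taken)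
def pvV (row : List String) (x : Int) : Int :=
  (PySem.Int.ofStr? (PySem.List.pyGetD row x "")).getD 0

theorem pv_foldl_mul {β : Type} (l : List β) (g : β → Int) (a : Int) :
    List.foldl (fun acc x => acc * g x) a l = a * (l.map g).prod := by
  induction l generalizing a with
  | nil => simp
  | cons x t ih => simp [ih, mul_assoc]

theorem pv_zip_map_map {α : Type} (l : List α) (S : α → Int) (vals : α → Int)
    (h : Int → Int → Int) :
    ((l.map S).zip (l.map vals)).map (fun p => h p.1 p.2)
      = l.map (fun x => h (S x) (vals x)) := by
  induction l with
  | nil => rfl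
  | cons a t ih => simp [ih]

theorem pv_getD_map_range (F : Nat → Int) (w k : Nat) (hk : k < w) (d : Int) :
    PySem.List.pyGetD ((List.range w).map F) (↑k) d = F k := by
  simp [PySem.List.pyGetD_natCast, List.getD, hk]

-- invariant of B's row-major fold: after processing rows R the state is the
-- per-column sums and products of R
theorem pv_fold_inv (w : Nat) (R : List (List String)) :
    R.foldl
      (fun (sp : List Int × List Int) row =>
        let vals := (List.range w).map
          (fun (x : Nat) => (PySem.Int.ofStr? (PySem.List.pyGetD row (x : Int) "")).getD 0)
        ((sp.1.zip vals).map (fun p => p.1 + p.2),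
         (sp.2.zip vals).map (fun p => p.1 * p.2)))
      (List.replicate w 0, List.replicate w 1)
    = ((List.range w).map (fun (x : Nat) => (R.map (fun r => pvV r (x : Int))).sum),
       (List.range w).map (fun (x : Nat) => (R.map (fun r => pvV r (x : Int))).prod)) := by
  induction R using List.reverseRecOn with
  | nil => simp [List.map_const']
  | append_singleton R r ih =>
    rw [List.foldl_append, ih]
    simp only [List.foldl_cons, List.foldl_nil]
    rw [pv_zip_map_map, pv_zip_map_map]
    simp [pvV]

theorem pv_main (R : List (List String)) (L : List String) :
    part1 (R ++ [L]) = part1_alt (R ++ [L]) := by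
  simp only [part1, part1_alt]
  set w := (PySem.List.pyGetD (R ++ [L]) 0 []).length with hw
  rw [PySem.List.pyRange_zero_natCast, List.foldl_map, PySem.List.foldl_add,
      PySem.List.slice_to_neg_one, List.dropLast_concat,
      PySem.List.pyGetD_neg_one_append_singleton, pv_fold_inv, zero_add]
  rw [PySem.List.enumerate_eq_map_pyRange _ (0 : Int)]
  have hlen : PySem.List.len ((List.range w).map
      (fun (x : Nat) => (R.map (fun r => pvV r (x : Int))).prod)) = (w : Int) := by
    simp [PySem.List.len]
  rw [hlen, PySem.List.pyRange_zero_natCast, List.map_map, List.map_map]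
  refine congrArg List.sum (List.map_congr_left ?_)
  intro k hk
  rw [List.mem_range] at hk
  simp only [Function.comp]
  rw [List.map_append, List.map_singleton, PySem.List.pyGetD_neg_one_append_singleton,
      PySem.List.slice_to_neg_one, List.dropLast_concat,
      pv_getD_map_range _ w k hk, pv_getD_map_range _ w k hk]
  split
  · rw [pv_foldl_mul, one_mul, List.map_map]; rfl
  · rw [PySem.List.foldl_add, zero_add, List.map_map]; rfl

-- ===== VERDICT (by name: the statement is the Claim_ definition above) =====
theorem part1_spec : Claim_equal_part1 := by
  intro data _ hpre
  obtain ⟨hne, -, -⟩ := hpre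
  unfold Spec_part1
  have h := pv_main data.dropLast (data.getLast hne)
  rwa [List.dropLast_append_getLast hne] at h
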